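-- pv_equiv track=rewrite | github.com/SalmanKhan957/dalil-verify | apps/api/main.py | _build_unique_exact_map
-- ===== SOURCE A (Python) =====
-- def _build_unique_exact_map(rows: list[dict], field: str) -> dict[str, dict | None]:
--     exact_map: dict[str, dict | None] = {}
--     for row in rows:
--         key = (row.get(field) or "").strip()
--         if not key:
--             continue
--         if key in exact_map:
--             exact_map[key] = None
--         else:
--             exact_map[key] = row
--     return exact_map
-- ===== SOURCE B (Python) =====
-- def _build_unique_exact_map(rows: list[dict], field: str) -> dict[str, dict | None]:
--     def key_of(row):
--         return (row.get(field) or "").strip()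
--
--     def build(rest, seen):
--         if not rest:
--             return {}
--         row, tail = rest[0], rest[1:]
--         k = key_of(row)
--         if not k or k in seen:
--             return build(tail, seen)
--         entry = None if any(key_of(r) == k for r in tail) else row
--         return {k: entry, **build(tail, seen + [k])}
--
--     return build(rows, [])
-- ===== Notes on version B (the rewrite author's own statement) =====
-- stated objective: alternative
-- what changed: A makes one pass maintaining a result dict and overwrites an entry with None when a duplicate key arrives; B is a structural recursion over the list that, at each first occurrence of a key, decides uniqueness by a lookahead 'any' scan over the remaining tail and prepends the finished entry, never revisiting or mutating an entry.
import Mathlib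
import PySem

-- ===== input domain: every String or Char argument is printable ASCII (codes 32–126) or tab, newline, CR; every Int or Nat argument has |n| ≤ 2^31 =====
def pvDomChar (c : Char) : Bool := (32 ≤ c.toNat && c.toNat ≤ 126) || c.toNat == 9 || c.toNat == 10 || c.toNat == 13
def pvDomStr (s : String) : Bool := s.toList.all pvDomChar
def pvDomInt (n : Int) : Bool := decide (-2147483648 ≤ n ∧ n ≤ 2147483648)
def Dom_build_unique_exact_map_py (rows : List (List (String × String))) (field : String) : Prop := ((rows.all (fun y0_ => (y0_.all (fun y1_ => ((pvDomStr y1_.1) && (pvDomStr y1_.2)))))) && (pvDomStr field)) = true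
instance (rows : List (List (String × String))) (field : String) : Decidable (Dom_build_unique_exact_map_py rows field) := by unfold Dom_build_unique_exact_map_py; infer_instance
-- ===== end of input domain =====

set_option maxHeartbeats 1000000


-- B replaces A's single pass that maintains a result dict and overwrites entries with None on
-- duplicates by a structural recursion that decides each first-seen key's uniqueness with a
-- lookahead scan over the tail and never mutates an emitted entry (alternative decomposition).

-- ===== PORT A =====
-- key = (row.get(field) or "").strip()   (the same subexpression occurs in both Pythons)
def pvKey (row : List (String × String)) (field : String) : String :=
  PySem.Str.strip (((PySem.Dict.mk row).get? field).getD "")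

def build_unique_exact_map_py (rows : List (List (String × String))) (field : String) : List (String × Option (List (String × String))) :=
  (rows.foldl (fun (exactMap : PySem.Dict String (Option (List (String × String)))) row =>
      let key := pvKey row field
      if key = "" then exactMap
      else if exactMap.contains key then exactMap.insert key none
      else exactMap.insert key (some row))
    PySem.Dict.empty).items

-- ===== PORT B =====
-- build(rest, seen); '{k: entry, **build(tail, seen + [k])}' is a cons because k ∈ seen+[k]
-- guarantees k never occurs as a key of the recursive result (exact on that account).
def pvBuild (field : String) : List (List (String × String)) → List String → List (String × Option (List (String × String)))
  | [], _ => []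
  | row :: tail, seen =>
    let k := pvKey row field
    if k = "" ∨ k ∈ seen then pvBuild field tail seen
    else (k, if tail.any (fun r => pvKey r field = k) then none else some row) :: pvBuild field tail (seen ++ [k])

def build_unique_exact_map_py_alt (rows : List (List (String × String))) (field : String) : List (String × Option (List (String × String))) :=
  pvBuild field rows []

-- ===== PRECONDITION & SPEC =====
def Spec_build_unique_exact_map_py (rows : List (List (String × String))) (field : String) (out : List (String × Option (List (String × String)))) : Prop := out = build_unique_exact_map_py_alt rows field
instance (rows : List (List (String × String))) (field : String) (out : List (String × Option (List (String × String)))) : Decidable (Spec_build_unique_exact_map_py rows field out) := by unfold Spec_build_unique_exact_map_py; infer_instance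

-- ===== CLAIM (what is proved, stated in full; the proofs are below) =====
def Claim_equal_build_unique_exact_map_py : Prop := ∀ (rows : List (List (String × String))) (field : String), Dom_build_unique_exact_map_py rows field → Spec_build_unique_exact_map_py rows field (build_unique_exact_map_py rows field)

-- ===== LEMMAS AND PROOFS =====

-- how the rows still to be processed will rewrite an already-emitted entry of A's dict
def pvMark (field : String) (rest : List (List (String × String))) (p : String × Option (List (String × String))) : String × Option (List (String × String)) :=
  (p.1, if rest.any (fun r => pvKey r field = p.1) then none else p.2)

-- loop invariant: A's remaining fold = mark the existing items by the lookahead over `rest`,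
-- then append exactly what B's recursion produces from `rest` with seen = em.keys
theorem pv_loop (field : String) (rest : List (List (String × String)))
    (em : PySem.Dict String (Option (List (String × String))))
    (h0 : "" ∉ em.keys) :
    (rest.foldl (fun exactMap row =>
        let key := pvKey row field
        if key = "" then exactMap
        else if exactMap.contains key then exactMap.insert key none
        else exactMap.insert key (some row)) em).items
    = em.items.map (pvMark field rest) ++ pvBuild field rest em.keys := by
  induction rest generalizing em with
  | nil =>
    simp only [List.foldl_nil, pvBuild, List.append_nil]
    rw [show List.map (pvMark field []) em.items = List.map id em.items from
          List.map_congr_left (fun p _ => by simp [pvMark]), List.map_id]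
  | cons row tail ih =>
    simp only [List.foldl_cons]
    by_cases hk0 : pvKey row field = ""
    · -- empty key: both skip; marking by row::tail = marking by tail since "" ∉ keys
      rw [if_pos hk0, ih em h0]
      have hskip : pvBuild field (row :: tail) em.keys = pvBuild field tail em.keys := by
        rw [pvBuild]
        simp [hk0]
      rw [hskip]
      congr 1
      apply List.map_congr_left
      intro p hp
      have hne : ¬ pvKey row field = p.1 := by
        rw [hk0]
        intro h
        exact h0 (h ▸ PySem.Dict.mem_keys_of_mem_items em hp)
      simp [pvMark, hne]
    · rw [if_neg hk0]
      by_cases hc : em.contains (pvKey row field) = true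
      · -- duplicate of an already-emitted key: A overwrites with none; B skips (k ∈ seen)
        rw [if_pos hc]
        have hkeys : (em.insert (pvKey row field) none).keys = em.keys :=
          PySem.Dict.keys_insert_of_contains em none hc
        rw [ih (em.insert (pvKey row field) none) (hkeys ▸ h0), hkeys]
        have hmem : pvKey row field ∈ em.keys := (PySem.Dict.contains_iff_mem_keys em _).1 hc
        have hskip : pvBuild field (row :: tail) em.keys = pvBuild field tail em.keys := by
          rw [pvBuild]
          simp [hmem]
        rw [hskip]
        congr 1
        rw [PySem.Dict.items_insert_of_contains em none hc, List.map_map]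
        apply List.map_congr_left
        intro p hp
        by_cases hpk : p.1 = pvKey row field
        · simp [pvMark, Function.comp, hpk]
        · have hb : (p.1 == pvKey row field) = false := by simp [hpk]
          have hne : ¬ pvKey row field = p.1 := fun h => hpk h.symm
          simp [pvMark, Function.comp, hb, hne]
      · -- first occurrence: A appends the row; B emits the lookahead-decided entry
        have hcf : em.contains (pvKey row field) = false := Bool.eq_false_iff.2 hc
        rw [if_neg (by simp [hcf])]
        have hkeys : (em.insert (pvKey row field) (some row)).keys = em.keys ++ [pvKey row field] :=
          PySem.Dict.keys_insert_of_not_contains em (some row) hcf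
        have h0' : "" ∉ (em.insert (pvKey row field) (some row)).keys := by
          rw [hkeys]
          simp only [List.mem_append, List.mem_singleton]
          rintro (h | h)
          · exact h0 h
          · exact hk0 h.symm
        rw [ih (em.insert (pvKey row field) (some row)) h0', hkeys,
            PySem.Dict.items_insert_of_not_contains em (some row) hcf]
        have hnotmem : ¬ pvKey row field ∈ em.keys := fun h =>
          Bool.false_ne_true (hcf ▸ (PySem.Dict.contains_iff_mem_keys em _).2 h)
        have hbuild : pvBuild field (row :: tail) em.keys
            = (pvKey row field,
                if tail.any (fun r => pvKey r field = pvKey row field) then none else some row)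
              :: pvBuild field tail (em.keys ++ [pvKey row field]) := by
          rw [pvBuild]
          exact if_neg (by rintro (h | h); exact hk0 h; exact hnotmem h)
        rw [hbuild, List.map_append]
        simp only [List.append_assoc, List.map_cons, List.map_nil]
        congr 1
        apply List.map_congr_left
        intro p hp
        have hpk : p.1 ≠ pvKey row field := fun h =>
          hnotmem (h ▸ PySem.Dict.mem_keys_of_mem_items em hp)
        have hne : ¬ pvKey row field = p.1 := fun h => hpk h.symm
        simp [pvMark, hne]

-- ===== VERDICT (by name: the statement is the Claim_ definition above) =====
theorem build_unique_exact_map_py_spec : Claim_equal_build_unique_exact_map_py := by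
  intro rows field _
  unfold Spec_build_unique_exact_map_py build_unique_exact_map_py build_unique_exact_map_py_alt
  rw [pv_loop field rows PySem.Dict.empty (by simp [PySem.Dict.empty, PySem.Dict.keys])]
  simp [PySem.Dict.empty]
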